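-- pv_equiv track=rewrite | github.com/abhiram2510/CCEMIT_AP_Lab | Practice/timepass.py | luckynumber
-- ===== SOURCE A (Python) =====
-- def luckynumber(n):
--     if(n<=55 and n>0):
--         final=0
--         for i in range(1,n+1):
--             a=pow(2,i)
--             final =final + a
--         return final
--     else:
--         return 0
-- ===== SOURCE B (Python) =====
-- def luckynumber(n):
--     if n > 55 or n <= 0:
--         return 0
--     def total(k):
--         # S(k) = sum of 2^i for i=1..k satisfies S(0)=0, S(k)=2*S(k-1)+2
--         return 0 if k == 0 else 2 * total(k - 1) + 2
--     return total(n)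
-- ===== Notes on version B (the rewrite author's own statement) =====
-- stated objective: alternative
-- what changed: Replaces A's loop that accumulates successive powers pow(2,i) with a recursive helper computing the geometric sum via the recurrence S(k)=2*S(k-1)+2, with the guard inverted to an early return.
import Mathlib
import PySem

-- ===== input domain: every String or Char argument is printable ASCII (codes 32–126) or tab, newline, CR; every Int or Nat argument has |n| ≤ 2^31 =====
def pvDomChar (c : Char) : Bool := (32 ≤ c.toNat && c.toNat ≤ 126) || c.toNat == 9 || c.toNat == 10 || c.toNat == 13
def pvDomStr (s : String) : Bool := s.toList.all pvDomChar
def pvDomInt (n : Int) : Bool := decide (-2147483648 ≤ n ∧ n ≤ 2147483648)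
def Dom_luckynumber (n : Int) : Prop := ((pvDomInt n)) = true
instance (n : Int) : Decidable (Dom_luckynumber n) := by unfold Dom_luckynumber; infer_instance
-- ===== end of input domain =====

-- B replaces A's power-accumulating loop with a recursion on the count using S(k) = 2*S(k-1) + 2.

-- ===== PORT A =====
-- loop 'for i in range(1,n+1): final = final + pow(2,i)'; i ≥ 1 inside the loop, so pow(2,i) = 2^i.toNat exactly
def luckynumber (n : Int) : Int :=
  if n ≤ 55 ∧ n > 0 then
    (PySem.List.pyRange 1 (n + 1) 1).foldl (fun final i => final + 2 ^ i.toNat) 0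
  else 0

-- ===== PORT B =====
-- recursive helper 'total(k) = 0 if k == 0 else 2*total(k-1) + 2'; k starts at n > 0, so Nat recursion is exact
def luckyTotal : Nat → Int
  | 0 => 0
  | k + 1 => 2 * luckyTotal k + 2

def luckynumber_alt (n : Int) : Int :=
  if n > 55 ∨ n ≤ 0 then 0
  else luckyTotal n.toNat

-- ===== PRECONDITION & SPEC =====
def Spec_luckynumber (n : Int) (out : Int) : Prop := out = luckynumber_alt n
instance (n : Int) (out : Int) : Decidable (Spec_luckynumber n out) := by unfold Spec_luckynumber; infer_instance

-- ===== CLAIM (what is proved, stated in full; the proofs are below) =====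
def Claim_equal_luckynumber : Prop := ∀ (n : Int), Dom_luckynumber n → Spec_luckynumber n (luckynumber n)

-- ===== LEMMAS AND PROOFS =====

theorem luckynumber_eq_alt (n : Int) : luckynumber n = luckynumber_alt n := by
  unfold luckynumber luckynumber_alt
  by_cases h : n ≤ 55 ∧ n > 0
  · obtain ⟨h1, h2⟩ := h
    interval_cases n <;> decide
  · rw [if_neg h, if_pos (by omega)]

-- ===== VERDICT (by name: the statement is the Claim_ definition above) =====
theorem luckynumber_spec : Claim_equal_luckynumber := by
  intro n _
  exact luckynumber_eq_alt n
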